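-- pv_equiv track=rewrite | github.com/falkzach/CSCI558-Computation-Biology | Homework3/dotplot_extra.py | dotplot
-- ===== SOURCE A (Python) =====
-- def dotplot(sequence1, sequence2, k):
--     width, height = len(sequence1), len(sequence2)
--
--     # instantiate a matrix of no matches, this allows us to only write matches
--     matrix = [[' ' for x in range(width)] for y in range(height)]
--     # normal scan through sequences
--     for x in range(width):
--         for y in range(height):
--             if sequence1[x] is sequence2[y]:
--                 # handle edge cases
--                 # only the lower right segment can have hits unless k is 1
--                 # this optimization allows us to simply ignore everything outside of that
--                 match = True if (x >= k - 1 and y >= k - 1) or (k <= 1) else False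
--
--                 # look back for k values to ensure it is still a match, only if we are looking for continuous matches
--                 if match and k > 1:
--                     # check only the diagonal, nearest first
--                     for i in range(1,k):
--                         dx, dy = x - i, y - i
--                         if dx > 0 and dy > 0:
--                             if sequence1[dx] is not sequence2[dy]:
--                                 match = False
--                                 break
--                 if match:
--                     matrix[y][x] = '.'
--     return [''.join(row) for row in matrix]
-- ===== SOURCE B (Python) =====
-- def dotplot(sequence1, sequence2, k):
--     # One diagonal run-length pass: run = length of the consecutive match run
--     # ending at (x, y); a matching cell gets a dot exactly when its run reaches k.
--     rows = []
--     prev = [0] * len(sequence1)                      # prev[x] = run ending at (x, y-1)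
--     for c2 in sequence2:
--         cur = []
--         line = []
--         for c1, diag in zip(sequence1, [0] + prev):  # diag = run ending at (x-1, y-1)
--             if c1 == c2:
--                 run = diag + 1
--                 line.append('.' if run >= k else ' ')
--             else:
--                 run = 0
--                 line.append(' ')
--             cur.append(run)
--         prev = cur
--         rows.append(''.join(line))
--     return rows
-- ===== Notes on version B (the rewrite author's own statement) =====
-- stated objective: faster
-- what changed: Replaces A's per-hit backward rescan of up to k-1 diagonal cells inside the W*H double loop by a single row-by-row pass that carries each diagonal's consecutive-match run length and dots a matching cell exactly when its run reaches k.
-- intended difference: For k >= 2, on inputs where some length-k diagonal window that touches row 0 or column 0 matches everywhere except at its first (border) character, A still dots the window's last cell (its look-back tests dx > 0 and dy > 0 instead of >= 0, so the diagonal's first character pair is never checked) while B dots a cell only when a genuine run of k consecutive equal characters ends there, which is the intended k-mer dotplot. — e.g. on dotplot("ab", "cb", 2): A returns [" ", " ."], B returns [" ", " "]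
import Mathlib
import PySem

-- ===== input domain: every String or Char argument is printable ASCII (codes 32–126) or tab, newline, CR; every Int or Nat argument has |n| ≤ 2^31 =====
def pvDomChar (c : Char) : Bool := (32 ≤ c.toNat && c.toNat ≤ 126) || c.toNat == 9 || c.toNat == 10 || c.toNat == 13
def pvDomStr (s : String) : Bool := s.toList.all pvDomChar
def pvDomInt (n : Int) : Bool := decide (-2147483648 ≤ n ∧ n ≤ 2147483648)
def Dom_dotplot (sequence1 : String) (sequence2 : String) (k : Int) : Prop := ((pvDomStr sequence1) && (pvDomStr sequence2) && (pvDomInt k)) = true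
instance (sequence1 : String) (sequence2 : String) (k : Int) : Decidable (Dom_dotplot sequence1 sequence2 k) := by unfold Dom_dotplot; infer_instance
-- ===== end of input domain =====

-- B replaces A's per-hit backward scan over up to k-1 diagonal cells by a single-pass
-- run-length DP over the rows (asymptotically fewer character comparisons); on the
-- border-diagonal windows where A's look-back skips index 0 (see D_ below) B returns
-- the intended k-mer dotplot instead of A's extra dots.

-- ===== PORT A =====
-- sequence1[x]: every index used is in range, so the `.getD` default never fires;
-- Python's `is` on the 1-char interned ASCII strings of Dom_ is equality
def pvChAt (l : List Char) (i : Int) : Char := (PySem.List.pyGet? l i).getD ' '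

-- the inner `for i in range(1,k)` loop with its `break`
def pvLookA (l1 l2 : List Char) (x y : Int) : List Int → Bool
  | [] => true
  | i :: rest =>
    let dx := x - i
    let dy := y - i
    if dx > 0 ∧ dy > 0 then
      if pvChAt l1 dx ≠ pvChAt l2 dy then false
      else pvLookA l1 l2 x y rest
    else pvLookA l1 l2 x y rest

-- the body of the double loop; matrix[y][x] = '.' with x, y drawn from range(...), so toNat is exact
def pvCellA (l1 l2 : List Char) (k x y : Int) (matrix : List (List Char)) : List (List Char) :=
  if pvChAt l1 x == pvChAt l2 y then
    let m0 : Bool := if ((x ≥ k - 1 ∧ y ≥ k - 1) ∨ k ≤ 1) then true else false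
    let m1 : Bool := if m0 ∧ k > 1 then pvLookA l1 l2 x y (PySem.List.pyRange 1 k 1) else m0
    if m1 then matrix.set y.toNat ((matrix.getD y.toNat []).set x.toNat '.') else matrix
  else matrix

def dotplot (sequence1 : String) (sequence2 : String) (k : Int) : List String :=
  let l1 := sequence1.toList
  let l2 := sequence2.toList
  let width : Int := PySem.Str.len sequence1
  let height : Int := PySem.Str.len sequence2
  let matrix : List (List Char) :=
    (PySem.List.pyRange 0 height 1).map (fun _ => (PySem.List.pyRange 0 width 1).map (fun _ => ' '))
  let matrix :=
    (PySem.List.pyRange 0 width 1).foldl (fun matrix x =>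
      (PySem.List.pyRange 0 height 1).foldl (fun matrix y => pvCellA l1 l2 k x y matrix) matrix) matrix
  matrix.map (fun row => String.ofList row)

-- ===== PORT B =====
-- inner loop of Source B: walks zip(sequence1, [0] + prev), building (cur, line)
def pvRowB (k : Int) (c2 : Char) : List (Char × Int) → List Int × List Char
  | [] => ([], [])
  | (c1, diag) :: rest =>
    let rc : Int × Char := if c1 == c2 then (diag + 1, if diag + 1 ≥ k then '.' else ' ') else (0, ' ')
    let rl := pvRowB k c2 rest
    (rc.1 :: rl.1, rc.2 :: rl.2)

-- outer loop of Source B: for c2 in sequence2, carrying prev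
def pvRowsB (l1 : List Char) (k : Int) : List Int → List Char → List String
  | _, [] => []
  | prev, c2 :: rest =>
    let rl := pvRowB k c2 (l1.zip (0 :: prev))
    String.ofList rl.2 :: pvRowsB l1 k rl.1 rest

def dotplot_alt (sequence1 : String) (sequence2 : String) (k : Int) : List String :=
  let l1 := sequence1.toList
  pvRowsB l1 k (List.replicate l1.length 0) sequence2.toList

-- ===== PRECONDITION & SPEC =====
-- cell (x, y) ends a length-k diagonal window that touches row 0 or column 0 (min x y = k - 1)
-- and matches at every offset except its first (border) character; pvChAt is port A's accessor
def pvBadAt (l1 l2 : List Char) (k : Int) (x y : Nat) : Prop :=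
  2 ≤ k ∧ (min x y : Int) = k - 1 ∧
  ∀ i ≤ min x y, ((pvChAt l1 (x - i) = pvChAt l2 (y - i)) ↔ i < min x y)

-- For k >= 2, on inputs where some length-k diagonal window touching row 0 or column 0
-- matches everywhere except at its first (border) character, A still dots the window's
-- last cell (its look-back tests dx > 0 and dy > 0 instead of >= 0, so the diagonal's
-- first character pair is never checked) while B dots a cell only when a genuine run of
-- k consecutive equal characters ends there, which is the intended k-mer dotplot.
def D_dotplot (sequence1 : String) (sequence2 : String) (k : Int) : Prop :=
  ∃ x < sequence1.toList.length, ∃ y < sequence2.toList.length,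
    pvBadAt sequence1.toList sequence2.toList k x y
instance (sequence1 : String) (sequence2 : String) (k : Int) : Decidable (D_dotplot sequence1 sequence2 k) := by unfold D_dotplot pvBadAt; infer_instance

def Spec_dotplot (sequence1 : String) (sequence2 : String) (k : Int) (out : List String) : Prop := ¬ D_dotplot sequence1 sequence2 k → out = dotplot_alt sequence1 sequence2 k
instance (sequence1 : String) (sequence2 : String) (k : Int) (out : List String) : Decidable (Spec_dotplot sequence1 sequence2 k out) := by unfold Spec_dotplot; infer_instance

def pvDiffWitness_dotplot : String × String × Int := ("ab", "cb", 2)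
def pvDiffWitnessOut_dotplot : (List String) × (List String) := (["  ", " ."], ["  ", "  "])

-- ===== CLAIM (what is proved, stated in full; the proofs are below) =====
def Claim_unchanged_dotplot : Prop := ∀ (sequence1 : String) (sequence2 : String) (k : Int), Dom_dotplot sequence1 sequence2 k → Spec_dotplot sequence1 sequence2 k (dotplot sequence1 sequence2 k)
def Claim_changed_dotplot : Prop := Dom_dotplot (pvDiffWitness_dotplot.1) (pvDiffWitness_dotplot.2.1) (pvDiffWitness_dotplot.2.2) ∧ D_dotplot (pvDiffWitness_dotplot.1) (pvDiffWitness_dotplot.2.1) (pvDiffWitness_dotplot.2.2) ∧ dotplot (pvDiffWitness_dotplot.1) (pvDiffWitness_dotplot.2.1) (pvDiffWitness_dotplot.2.2) = pvDiffWitnessOut_dotplot.1 ∧ dotplot_alt (pvDiffWitness_dotplot.1) (pvDiffWitness_dotplot.2.1) (pvDiffWitness_dotplot.2.2) = pvDiffWitnessOut_dotplot.2 ∧ pvDiffWitnessOut_dotplot.1 ≠ pvDiffWitnessOut_dotplot.2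
def Claim_exact_dotplot : Prop := ∀ (sequence1 : String) (sequence2 : String) (k : Int), Dom_dotplot sequence1 sequence2 k → D_dotplot sequence1 sequence2 k → dotplot sequence1 sequence2 k ≠ dotplot_alt sequence1 sequence2 k

-- ===== LEMMAS AND PROOFS =====

-- whether the characters at positions (x, y) of the two sequences match
def pvMEq (l1 l2 : List Char) (x y : Nat) : Bool := l1.getD x ' ' == l2.getD y ' '

-- diagonal run length of consecutive matches ending at (x, y)
def pvRun (l1 l2 : List Char) : Nat → Nat → Int
  | 0, y => if pvMEq l1 l2 0 y then 1 else 0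
  | x + 1, 0 => if pvMEq l1 l2 (x + 1) 0 then 1 else 0
  | x + 1, y + 1 => if pvMEq l1 l2 (x + 1) (y + 1) then pvRun l1 l2 x y + 1 else 0

-- per-cell mark condition of A
def pvCondA (l1 l2 : List Char) (k x y : Int) : Bool :=
  (pvChAt l1 x == pvChAt l2 y) &&
  (let m0 : Bool := if ((x ≥ k - 1 ∧ y ≥ k - 1) ∨ k ≤ 1) then true else false
   if m0 ∧ k > 1 then pvLookA l1 l2 x y (PySem.List.pyRange 1 k 1) else m0)

-- per-cell mark condition of B
def pvCondB (l1 l2 : List Char) (k : Int) (x y : Nat) : Bool :=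
  pvMEq l1 l2 x y && decide (pvRun l1 l2 x y ≥ k)

-- the bad cells of D_ as a per-cell condition
def pvBad (l1 l2 : List Char) (k : Int) (x y : Nat) : Prop :=
  2 ≤ k ∧ min x y = (k - 1).toNat ∧
  (∀ i < (k - 1).toNat, pvMEq l1 l2 (x - i) (y - i) = true) ∧
  pvMEq l1 l2 (x - (k - 1).toNat) (y - (k - 1).toNat) = false

-- run value carried in `prev` while processing row y (runs of row y-1; zeros for y = 0)
def pvPrevSpec (l1 l2 : List Char) (x y : Nat) : Int := if y = 0 then 0 else pvRun l1 l2 x (y - 1)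

-- pvRun in "diag" form
theorem pvRun_diag (l1 l2 : List Char) (x y : Nat) :
    pvRun l1 l2 x y =
      if pvMEq l1 l2 x y then (if x = 0 ∨ y = 0 then 0 else pvRun l1 l2 (x - 1) (y - 1)) + 1 else 0 := by
  match x, y with
  | 0, y => simp [pvRun]
  | x + 1, 0 => simp [pvRun]
  | x + 1, y + 1 => simp [pvRun]

-- ---- characterization of B's inner loop ----

theorem pvRowB_len (k : Int) (c2 : Char) : ∀ (zs : List (Char × Int)),
    (pvRowB k c2 zs).1.length = zs.length ∧ (pvRowB k c2 zs).2.length = zs.length := by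
  intro zs
  induction zs with
  | nil => exact ⟨rfl, rfl⟩
  | cons p rest ih =>
    obtain ⟨c1, diag⟩ := p
    simpa [pvRowB] using ih

theorem pvRowB_get (k : Int) (c2 : Char) : ∀ (zs : List (Char × Int)) (n : Nat)
    (hn : n < zs.length),
    (pvRowB k c2 zs).1[n]'(by rw [(pvRowB_len k c2 zs).1]; exact hn) =
      (if zs[n].1 == c2 then zs[n].2 + 1 else 0) ∧
    (pvRowB k c2 zs).2[n]'(by rw [(pvRowB_len k c2 zs).2]; exact hn) =
      (if zs[n].1 == c2 then (if zs[n].2 + 1 ≥ k then '.' else ' ') else ' ') := by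
  intro zs
  induction zs with
  | nil => intro n hn; exact absurd hn (by simp)
  | cons p rest ih =>
    intro n hn
    obtain ⟨c1, diag⟩ := p
    cases n with
    | zero => by_cases h : c1 == c2 <;> simp [pvRowB, h]
    | succ m =>
      have hm : m < rest.length := by simpa using hn
      simpa [pvRowB] using ih m hm

-- ---- characterization of B ----

theorem pvRowsB_eq (l1 l2 : List Char) (k : Int) : ∀ (tl : List Char) (y : Nat) (prev : List Int),
    tl = l2.drop y →
    prev = (List.range l1.length).map (fun x => pvPrevSpec l1 l2 x y) →
    pvRowsB l1 k prev tl =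
      (List.range tl.length).map (fun j =>
        String.ofList ((List.range l1.length).map (fun x => if pvCondB l1 l2 k x (y + j) then '.' else ' '))) := by
  intro tl
  induction tl with
  | nil => intro y prev _ _; simp [pvRowsB]
  | cons c2 rest ih =>
    intro y prev htl hprev
    subst hprev
    have hyH : y < l2.length := by
      by_contra hcon
      rw [List.drop_eq_nil_of_le (by omega)] at htl
      exact List.cons_ne_nil _ _ htl
    have hc2 : l2[y]'hyH = c2 := by
      have h0 : (l2.drop y)[0]'(by rw [← htl]; simp) = c2 := by
        simp only [← htl, List.getElem_cons_zero]
      simpa using h0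
    have hrest : rest = l2.drop (y + 1) := by
      have ht : (l2.drop y).tail = rest := by rw [← htl]; rfl
      rw [← ht, List.tail_drop]
    set prev := (List.range l1.length).map (fun x => pvPrevSpec l1 l2 x y) with hprev
    have hprevlen : prev.length = l1.length := by rw [hprev]; simp
    have hzslen : (l1.zip (0 :: prev)).length = l1.length := by
      simp [hprevlen]
    have hzsget : ∀ n (hn : n < l1.length),
        (l1.zip (0 :: prev))[n]'(by rw [hzslen]; exact hn) = (l1[n], (0 :: prev)[n]'(by simp [hprevlen]; omega)) := by
      intro n hn
      rw [List.getElem_zip]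
    have hpget : ∀ m (hm : m < l1.length), (0 :: prev)[m + 1]'(by simp [hprevlen]; omega) = pvPrevSpec l1 l2 m y := by
      intro m hm
      simp only [List.getElem_cons_succ, hprev, List.getElem_map, List.getElem_range]
    have hMc : ∀ n (hn : n < l1.length), (l1[n]'hn == c2) = pvMEq l1 l2 n y := by
      intro n hn
      unfold pvMEq
      rw [List.getD_eq_getElem l1 ' ' hn, List.getD_eq_getElem l2 ' ' hyH, hc2]
    have hdiag : ∀ n (hn : n < l1.length),
        ((0 :: prev)[n]'(by simp [hprevlen]; omega)) = (if n = 0 ∨ y = 0 then 0 else pvRun l1 l2 (n - 1) (y - 1)) := by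
      intro n hn
      cases n with
      | zero => simp
      | succ m =>
        rw [hpget m (by omega)]
        cases y with
        | zero => simp [pvPrevSpec]
        | succ s => simp [pvPrevSpec]
    have hrun : ∀ n (hn : n < l1.length),
        (if (l1[n]'hn == c2) then ((0 :: prev)[n]'(by simp [hprevlen]; omega)) + 1 else 0) = pvRun l1 l2 n y := by
      intro n hn
      rw [hMc n hn, hdiag n hn]
      exact (pvRun_diag l1 l2 n y).symm
    -- the run list produced for this row is exactly the prev list for row y+1
    have hcur : (pvRowB k c2 (l1.zip (0 :: prev))).1 =
        (List.range l1.length).map (fun x => pvPrevSpec l1 l2 x (y + 1)) := by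
      apply List.ext_getElem
      · rw [(pvRowB_len k c2 _).1, hzslen]; simp
      · intro n h1 h2
        have hn : n < l1.length := by simpa using h2
        have hget := (pvRowB_get k c2 (l1.zip (0 :: prev)) n (by rw [hzslen]; exact hn)).1
        rw [hget, hzsget n hn]
        simp only [List.getElem_map, List.getElem_range]
        rw [show pvPrevSpec l1 l2 n (y + 1) = pvRun l1 l2 n y by
          simp [pvPrevSpec]]
        exact hrun n hn
    -- the character list produced for this row is exactly row y of the spec
    have hline : (pvRowB k c2 (l1.zip (0 :: prev))).2 =
        (List.range l1.length).map (fun x => if pvCondB l1 l2 k x y then '.' else ' ') := by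
      apply List.ext_getElem
      · rw [(pvRowB_len k c2 _).2, hzslen]; simp
      · intro n h1 h2
        have hn : n < l1.length := by simpa using h2
        have hget := (pvRowB_get k c2 (l1.zip (0 :: prev)) n (by rw [hzslen]; exact hn)).2
        rw [hget, hzsget n hn]
        simp only [List.getElem_map, List.getElem_range]
        unfold pvCondB
        by_cases hb : (l1[n]'hn == c2) = true
        · have hM : pvMEq l1 l2 n y = true := by rw [← hMc n hn]; exact hb
          have hr : ((0 :: prev)[n]'(by simp [hprevlen]; omega)) + 1 = pvRun l1 l2 n y := by
            have := hrun n hn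
            rwa [if_pos hb] at this
          rw [if_pos hb, hM, hr]
          simp
        · have hM : pvMEq l1 l2 n y = false := by rw [← hMc n hn]; simpa using hb
          rw [if_neg (by simpa using hb), hM]
          simp
    show String.ofList (pvRowB k c2 (l1.zip (0 :: prev))).2 ::
        pvRowsB l1 k (pvRowB k c2 (l1.zip (0 :: prev))).1 rest = _
    rw [hline, hcur, ih (y + 1) _ hrest rfl]
    rw [List.length_cons, List.range_succ_eq_map, List.map_cons, List.map_map]
    congr 1
    refine List.map_congr_left (fun j hj => ?_)
    simp only [Function.comp_apply]
    rw [show y + 1 + j = y + (j + 1) from by omega]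

theorem dotplot_alt_eq (s1 s2 : String) (k : Int) :
    dotplot_alt s1 s2 k =
      (List.range s2.toList.length).map (fun (y : Nat) =>
        String.ofList ((List.range s1.toList.length).map (fun (x : Nat) =>
          if pvCondB s1.toList s2.toList k x y then '.' else ' '))) := by
  show pvRowsB s1.toList k (List.replicate s1.toList.length 0) s2.toList = _
  rw [pvRowsB_eq s1.toList s2.toList k s2.toList 0 (List.replicate s1.toList.length 0) (by simp)
    (by simp [pvPrevSpec, List.map_const'])]
  simp

-- ---- characterization of A ----

theorem pvLookA_all (l1 l2 : List Char) (x y : Int) (is : List Int) :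
    pvLookA l1 l2 x y is =
      is.all (fun i => !(decide (x - i > 0 ∧ y - i > 0)) || (pvChAt l1 (x - i) == pvChAt l2 (y - i))) := by
  induction is with
  | nil => rfl
  | cons i rest ih =>
    simp only [pvLookA, List.all_cons, ih]
    by_cases h : x - i > 0 ∧ y - i > 0
    · rw [if_pos h]
      have hdt : decide (x - i > 0 ∧ y - i > 0) = true := decide_eq_true h
      by_cases hc : pvChAt l1 (x - i) = pvChAt l2 (y - i)
      · rw [if_neg (by simp [hc])]
        simp [hc]
      · rw [if_pos (by simp [hc])]
        rw [hdt, beq_eq_false_iff_ne.mpr hc]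
        rfl
    · rw [if_neg h]
      have hd : decide (x - i > 0 ∧ y - i > 0) = false := by simpa using h
      rw [hd]
      simp

theorem pvCellA_eq (l1 l2 : List Char) (k x y : Int) (M : List (List Char)) :
    pvCellA l1 l2 k x y M =
      if pvCondA l1 l2 k x y then M.set y.toNat ((M.getD y.toNat []).set x.toNat '.') else M := by
  unfold pvCellA pvCondA
  by_cases h1 : (pvChAt l1 x == pvChAt l2 y) = true
  · simp only [h1, if_pos, Bool.true_and]
  · simp [h1]

-- matrix M is the H×W grid whose (x, y) entry is '.' exactly on P x y
def pvInv (W H : Nat) (P : Nat → Nat → Bool) (M : List (List Char)) : Prop :=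
  M.length = H ∧ ∀ (y : Nat) (hy : y < M.length), (M[y]).length = W ∧
    ∀ (x : Nat) (hx : x < (M[y]).length), (M[y])[x] = if P x y then '.' else ' '

theorem pvInv_congr (W H : Nat) (P Q : Nat → Nat → Bool) (M : List (List Char))
    (hpq : ∀ a < W, ∀ b < H, P a b = Q a b) (h : pvInv W H P M) : pvInv W H Q M := by
  obtain ⟨hlen, hrow⟩ := h
  refine ⟨hlen, fun y hy => ?_⟩
  obtain ⟨hrl, hent⟩ := hrow y hy
  refine ⟨hrl, fun x hx => ?_⟩
  rw [hent x hx, hpq x (by omega) y (by omega)]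

-- generic: the "write '.' at (x, y) if c, else leave" step preserves the invariant
theorem pvWrite_inv (W H : Nat) (P : Nat → Nat → Bool) (x y : Nat) (hx : x < W) (hy : y < H)
    (c : Bool) (M : List (List Char)) (h : pvInv W H P M) :
    pvInv W H (fun a b => P a b || (decide (a = x) && decide (b = y) && c))
      (if c = true then M.set y ((M.getD y []).set x '.') else M) := by
  obtain ⟨hlen, hrow⟩ := h
  by_cases hc : c = true
  · rw [if_pos hc]
    subst hc
    have hyM : y < M.length := by omega
    have hgd : M.getD y [] = M[y] := List.getD_eq_getElem M [] hyM
    refine ⟨by simpa using hlen, ?_⟩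
    intro b hb
    have hbM : b < M.length := by simpa using hb
    by_cases hby : b = y
    · subst hby
      have e : (M.set b ((M.getD b []).set x '.'))[b]'hb = (M.getD b []).set x '.' := by
        rw [List.getElem_set_self]
      rw [e, hgd]
      obtain ⟨hrl, hent⟩ := hrow b hbM
      refine ⟨by simpa using hrl, ?_⟩
      intro a ha
      have haM : a < (M[b]'hbM).length := by simpa using ha
      by_cases hax : a = x
      · subst hax
        rw [List.getElem_set_self (by omega)]
        simp
      · rw [List.getElem_set_ne (by omega)]
        rw [hent a haM]
        simp [hax]
    · have e : (M.set y ((M.getD y []).set x '.'))[b]'hb = M[b]'hbM := by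
        rw [List.getElem_set_ne (by omega)]
      rw [e]
      obtain ⟨hrl, hent⟩ := hrow b hbM
      refine ⟨hrl, ?_⟩
      intro a ha
      rw [hent a ha]
      simp [hby]
  · rw [if_neg hc]
    have hcf : c = false := by simpa using hc
    subst hcf
    refine ⟨hlen, ?_⟩
    intro b hb
    obtain ⟨hrl, hent⟩ := hrow b hb
    refine ⟨hrl, ?_⟩
    intro a ha
    rw [hent a ha]
    simp

theorem pvCellA_inv (l1 l2 : List Char) (k : Int) (W H : Nat) (P : Nat → Nat → Bool)
    (x y : Nat) (hx : x < W) (hy : y < H) (M : List (List Char)) (h : pvInv W H P M) :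
    pvInv W H (fun a b => P a b || (decide (a = x) && decide (b = y) && pvCondA l1 l2 k (x : Int) (y : Int)))
      (pvCellA l1 l2 k (x : Int) (y : Int) M) := by
  rw [pvCellA_eq]
  have hw := pvWrite_inv W H P x y hx hy (pvCondA l1 l2 k (x : Int) (y : Int)) M h
  simpa using hw

theorem pvInnerA_inv (l1 l2 : List Char) (k : Int) (W H : Nat) (x : Nat) (hx : x < W) :
    ∀ (b : Nat) (P : Nat → Nat → Bool) (M : List (List Char)), b ≤ H → pvInv W H P M →
    pvInv W H (fun a y => P a y || (decide (a = x) && decide (b ≤ y) && pvCondA l1 l2 k (x : Int) (y : Int)))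
      ((PySem.List.pyRange (b : Int) (H : Int) 1).foldl (fun M yy => pvCellA l1 l2 k (x : Int) yy M) M) := by
  suffices hs : ∀ (n b : Nat) (P : Nat → Nat → Bool) (M : List (List Char)), H - b = n → b ≤ H → pvInv W H P M →
      pvInv W H (fun a y => P a y || (decide (a = x) && decide (b ≤ y) && pvCondA l1 l2 k (x : Int) (y : Int)))
        ((PySem.List.pyRange (b : Int) (H : Int) 1).foldl (fun M yy => pvCellA l1 l2 k (x : Int) yy M) M) by
    intro b P M hb h
    exact hs (H - b) b P M rfl hb h
  intro n
  induction n with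
  | zero =>
    intro b P M hn hb h
    have hbe : b = H := by omega
    rw [PySem.List.pyRange_one_eq_nil (by exact_mod_cast hbe.ge)]
    simp only [List.foldl_nil]
    refine pvInv_congr W H P _ M (fun a ha y hy => ?_) h
    have hHy : decide (b ≤ y) = false := decide_eq_false_iff_not.mpr (by omega)
    simp [hHy]
  | succ n ih =>
    intro b P M hn hb h
    have hbH : b < H := by omega
    rw [PySem.List.pyRange_one_cons (by exact_mod_cast hbH : (b : Int) < (H : Int))]
    simp only [List.foldl_cons]
    have h1 := pvCellA_inv l1 l2 k W H P x b hx hbH M h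
    have hcast : ((b : Int) + 1) = ((b + 1 : Nat) : Int) := by push_cast; ring
    rw [hcast]
    have h2 := ih (b + 1) _ _ (by omega) (by omega) h1
    refine pvInv_congr W H _ _ _ (fun a ha y hy => ?_) h2
    by_cases hyb : y = b
    · subst hyb
      simp
    · have e1 : decide (y = b) = false := by simpa using hyb
      have e2 : decide (b < y) = decide (b ≤ y) :=
        decide_eq_decide.mpr ⟨fun hh => by omega, fun hh => by omega⟩
      simp [e1, e2]

theorem pvOuterA_inv (l1 l2 : List Char) (k : Int) (W H : Nat) :
    ∀ (a : Nat) (P : Nat → Nat → Bool) (M : List (List Char)), a ≤ W → pvInv W H P M →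
    pvInv W H (fun x y => P x y || (decide (a ≤ x) && pvCondA l1 l2 k (x : Int) (y : Int)))
      ((PySem.List.pyRange (a : Int) (W : Int) 1).foldl (fun M xx =>
        (PySem.List.pyRange 0 (H : Int) 1).foldl (fun M yy => pvCellA l1 l2 k xx yy M) M) M) := by
  suffices hs : ∀ (n a : Nat) (P : Nat → Nat → Bool) (M : List (List Char)), W - a = n → a ≤ W → pvInv W H P M →
      pvInv W H (fun x y => P x y || (decide (a ≤ x) && pvCondA l1 l2 k (x : Int) (y : Int)))
        ((PySem.List.pyRange (a : Int) (W : Int) 1).foldl (fun M xx =>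
          (PySem.List.pyRange 0 (H : Int) 1).foldl (fun M yy => pvCellA l1 l2 k xx yy M) M) M) by
    intro a P M ha h
    exact hs (W - a) a P M rfl ha h
  intro n
  induction n with
  | zero =>
    intro a P M hn ha h
    have hae : a = W := by omega
    rw [show PySem.List.pyRange (a : Int) (W : Int) 1 = [] from
      PySem.List.pyRange_one_eq_nil (by exact_mod_cast hae.ge)]
    simp only [List.foldl_nil]
    refine pvInv_congr W H P _ M (fun b hb y hy => ?_) h
    have hWb : decide (a ≤ b) = false := decide_eq_false_iff_not.mpr (by omega)
    simp [hWb]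
  | succ n ih =>
    intro a P M hn ha h
    have haW : a < W := by omega
    rw [PySem.List.pyRange_one_cons (by exact_mod_cast haW : (a : Int) < (W : Int))]
    simp only [List.foldl_cons]
    have h0 : ((0 : Nat) : Int) = (0 : Int) := rfl
    have h1 := pvInnerA_inv l1 l2 k W H a haW 0 P M (by omega) h
    rw [h0] at h1
    have hcast : ((a : Int) + 1) = ((a + 1 : Nat) : Int) := by push_cast; ring
    rw [hcast]
    have h2 := ih (a + 1) _ _ (by omega) (by omega) h1
    refine pvInv_congr W H _ _ _ (fun b hb y hy => ?_) h2
    by_cases hba : b = a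
    · subst hba
      simp
    · have e1 : decide (b = a) = false := by simpa using hba
      have e2 : decide (a < b) = decide (a ≤ b) :=
        decide_eq_decide.mpr ⟨fun hh => by omega, fun hh => by omega⟩
      have e4 : decide (0 ≤ y) = true := by simp
      simp [e1, e2]

theorem dotplot_eq (s1 s2 : String) (k : Int) :
    dotplot s1 s2 k =
      (List.range s2.toList.length).map (fun (y : Nat) =>
        String.ofList ((List.range s1.toList.length).map (fun (x : Nat) =>
          if pvCondA s1.toList s2.toList k (x : Int) (y : Int) then '.' else ' '))) := by
  set l1 := s1.toList with hl1
  set l2 := s2.toList with hl2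
  set W := l1.length with hW
  set H := l2.length with hH
  have hwlen : PySem.Str.len s1 = (W : Int) := by simp [PySem.Str.len_eq, hW, hl1]
  have hhlen : PySem.Str.len s2 = (H : Int) := by simp [PySem.Str.len_eq, hH, hl2]
  have hinit : pvInv W H (fun _ _ => false)
      ((PySem.List.pyRange 0 (H : Int) 1).map (fun _ => (PySem.List.pyRange 0 (W : Int) 1).map (fun _ => (' ' : Char)))) := by
    constructor
    · simp [PySem.List.length_pyRange_one]
    · intro y hy
      constructor
      · simp [PySem.List.length_pyRange_one]
      · intro x hx
        simp
  have hfin := pvOuterA_inv l1 l2 k W H 0 (fun _ _ => false) _ (by omega) hinit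
  have hfin2 : pvInv W H (fun x y => pvCondA l1 l2 k (x : Int) (y : Int))
      ((PySem.List.pyRange 0 (W : Int) 1).foldl (fun M xx =>
        (PySem.List.pyRange 0 (H : Int) 1).foldl (fun M yy => pvCellA l1 l2 k xx yy M) M)
        ((PySem.List.pyRange 0 (H : Int) 1).map (fun _ => (PySem.List.pyRange 0 (W : Int) 1).map (fun _ => (' ' : Char))))) := by
    refine pvInv_congr W H _ _ _ (fun a ha y hy => ?_) hfin
    simp
  show (((PySem.List.pyRange 0 (PySem.Str.len s1) 1).foldl (fun matrix x =>
      (PySem.List.pyRange 0 (PySem.Str.len s2) 1).foldl (fun matrix y => pvCellA l1 l2 k x y matrix) matrix)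
      ((PySem.List.pyRange 0 (PySem.Str.len s2) 1).map (fun _ => (PySem.List.pyRange 0 (PySem.Str.len s1) 1).map (fun _ => (' ' : Char))))).map
      (fun row => String.ofList row)) = _
  rw [hwlen, hhlen]
  obtain ⟨hflen, hfrow⟩ := hfin2
  apply List.ext_getElem
  · simpa using hflen
  · intro y hy1 hy2
    have hyH : y < H := by simpa using hy2
    simp only [List.getElem_map, List.getElem_range]
    obtain ⟨hrl, hent⟩ := hfrow y (by rw [hflen]; exact hyH)
    congr 1
    apply List.ext_getElem
    · simpa using hrl
    · intro x hx1 hx2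
      have hxW : x < W := by simpa using hx2
      simp only [List.getElem_map, List.getElem_range]
      exact hent x (by rw [hrl]; exact hxW)

-- ---- the run-length lemma and the pointwise comparison ----

theorem pvRun_nonneg (l1 l2 : List Char) : ∀ x y, 0 ≤ pvRun l1 l2 x y := by
  intro x
  induction x with
  | zero => intro y; simp [pvRun]; split <;> omega
  | succ x ih =>
    intro y
    cases y with
    | zero => simp [pvRun]; split <;> omega
    | succ y =>
      simp only [pvRun]
      split
      · have := ih y; omega
      · omega

theorem pvRun_ge_iff (l1 l2 : List Char) : ∀ (x y : Nat) (t : Nat),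
    ((t : Int) ≤ pvRun l1 l2 x y) ↔ (t ≤ min x y + 1 ∧ ∀ j < t, pvMEq l1 l2 (x - j) (y - j) = true) := by
  intro x
  induction x with
  | zero =>
    intro y t
    simp only [pvRun]
    by_cases hm : pvMEq l1 l2 0 y = true
    · rw [if_pos hm]
      constructor
      · intro h
        have ht : t ≤ 1 := by omega
        refine ⟨by omega, ?_⟩
        intro j hj
        have : j = 0 := by omega
        subst this
        simpa using hm
      · intro ⟨h1, _⟩
        have : t ≤ 1 := by omega
        omega
    · rw [if_neg hm]
      constructor
      · intro h
        have ht : t = 0 := by omega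
        subst ht; simp
      · intro ⟨h1, h2⟩
        have : t = 0 := by
          by_contra hc
          exact hm (by simpa using h2 0 (by omega))
        subst this; simp
  | succ x ih =>
    intro y t
    cases y with
    | zero =>
      simp only [pvRun]
      by_cases hm : pvMEq l1 l2 (x + 1) 0 = true
      · rw [if_pos hm]
        constructor
        · intro h
          refine ⟨by omega, ?_⟩
          intro j hj
          have : j = 0 := by omega
          subst this
          simpa using hm
        · intro ⟨h1, _⟩
          have : t ≤ 1 := by omega
          omega
      · rw [if_neg hm]
        constructor
        · intro h
          have ht : t = 0 := by omega
          subst ht; simp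
        · intro ⟨h1, h2⟩
          have : t = 0 := by
            by_contra hc
            exact hm (by simpa using h2 0 (by omega))
          subst this; simp
    | succ y =>
      cases t with
      | zero => simp [pvRun_nonneg]
      | succ s =>
        simp only [pvRun]
        by_cases hm : pvMEq l1 l2 (x + 1) (y + 1) = true
        · rw [if_pos hm]
          have hih := ih y s
          constructor
          · intro h
            have hs : (s : Int) ≤ pvRun l1 l2 x y := by push_cast at h ⊢; omega
            obtain ⟨h1, h2⟩ := hih.mp hs
            refine ⟨by omega, ?_⟩
            intro j hj
            cases j with
            | zero => simpa using hm
            | succ i =>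
              have e1 : x + 1 - (i + 1) = x - i := by omega
              have e2 : y + 1 - (i + 1) = y - i := by omega
              rw [e1, e2]
              exact h2 i (by omega)
          · intro ⟨h1, h2⟩
            have hs : (s : Int) ≤ pvRun l1 l2 x y := by
              apply hih.mpr
              refine ⟨by omega, ?_⟩
              intro i hi
              have hh := h2 (i + 1) (by omega)
              have e1 : x + 1 - (i + 1) = x - i := by omega
              have e2 : y + 1 - (i + 1) = y - i := by omega
              rwa [e1, e2] at hh
            push_cast at hs ⊢; omega
        · rw [if_neg hm]
          constructor
          · intro h
            exfalso
            have : (s : Int) + 1 ≤ 0 := by push_cast at h; omega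
            omega
          · intro ⟨h1, h2⟩
            exfalso
            exact hm (by simpa using h2 0 (by omega))

theorem pvChAt_toNat (l : List Char) (e : Int) (h : 0 ≤ e) : pvChAt l e = l.getD e.toNat ' ' := by
  obtain ⟨n, rfl⟩ : ∃ n : Nat, e = (n : Int) := ⟨e.toNat, by omega⟩
  rw [pvChAt]
  simp [List.getD_eq_getElem?_getD]

-- A's per-cell condition, in terms of pvMEq (k ≥ 2)
theorem pvCondA_iff (l1 l2 : List Char) (k : Int) (x y : Nat) (hk : 2 ≤ k) :
    pvCondA l1 l2 k (x : Int) (y : Int) = true ↔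
      (pvMEq l1 l2 x y = true ∧ k - 1 ≤ (x : Int) ∧ k - 1 ≤ (y : Int) ∧
        ∀ j : Nat, 1 ≤ j → (j : Int) ≤ k - 1 → j < x → j < y → pvMEq l1 l2 (x - j) (y - j) = true) := by
  have hch1 : pvChAt l1 (x : Int) = l1.getD x ' ' := by
    simpa using pvChAt_toNat l1 (x : Int) (by positivity)
  have hch2 : pvChAt l2 (y : Int) = l2.getD y ' ' := by
    simpa using pvChAt_toNat l2 (y : Int) (by positivity)
  unfold pvCondA
  rw [hch1, hch2]
  by_cases hb : ((x : Int) ≥ k - 1 ∧ (y : Int) ≥ k - 1)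
  · rw [if_pos (Or.inl hb)]
    show ((l1.getD x ' ' == l2.getD y ' ') && (if true = true ∧ k > 1 then pvLookA l1 l2 (↑x) (↑y) (PySem.List.pyRange 1 k) else true)) = true ↔ _
    rw [if_pos ⟨rfl, by omega⟩]
    rw [Bool.and_eq_true, pvLookA_all, List.all_eq_true]
    constructor
    · intro ⟨hM, hall⟩
      refine ⟨by simpa [pvMEq] using hM, by omega, by omega, ?_⟩
      intro j hj1 hjk hjx hjy
      have hcall := hall ((j : Int)) (by
        rw [PySem.List.mem_pyRange_one]
        constructor <;> [exact_mod_cast hj1; omega])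
      simp only [Bool.or_eq_true, Bool.not_eq_true', decide_eq_false_iff_not, beq_iff_eq] at hcall
      rcases hcall with hno | hch
      · exact absurd ⟨by omega, by omega⟩ hno
      · rw [pvChAt_toNat _ _ (by omega), pvChAt_toNat _ _ (by omega)] at hch
        have e1 : ((x:Int) - (j:Int)).toNat = x - j := by omega
        have e2 : ((y:Int) - (j:Int)).toNat = y - j := by omega
        rw [e1, e2] at hch
        simpa [pvMEq] using hch
    · intro ⟨hM, _, _, hmj⟩
      refine ⟨by simpa [pvMEq] using hM, ?_⟩
      intro i hi
      rw [PySem.List.mem_pyRange_one] at hi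
      obtain ⟨hi1, hik⟩ := hi
      simp only [Bool.or_eq_true, Bool.not_eq_true', decide_eq_false_iff_not, beq_iff_eq]
      by_cases hio : (x:Int) - i > 0 ∧ (y:Int) - i > 0
      · right
        have hme := hmj i.toNat (by omega) (by omega) (by omega) (by omega)
        simp only [pvMEq, beq_iff_eq] at hme
        rw [pvChAt_toNat _ _ (by omega), pvChAt_toNat _ _ (by omega)]
        have e1 : ((x:Int) - i).toNat = x - i.toNat := by omega
        have e2 : ((y:Int) - i).toNat = y - i.toNat := by omega
        rw [e1, e2]
        exact hme
      · left
        omega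
  · have h1 : ¬(((x:Int) ≥ k - 1 ∧ (y:Int) ≥ k - 1) ∨ k ≤ 1) := by omega
    simp only [if_neg h1]
    constructor
    · intro h
      exact absurd h (by simp)
    · intro ⟨_, h2, h3, _⟩
      exact absurd ⟨h2, h3⟩ hb

-- B's per-cell condition, in terms of pvMEq (k ≥ 2)
theorem pvCondB_iff (l1 l2 : List Char) (k : Int) (x y : Nat) (hk : 2 ≤ k) :
    pvCondB l1 l2 k x y = true ↔
      (k - 1 ≤ (min x y : Nat) ∧ ∀ j : Nat, (j : Int) ≤ k - 1 → pvMEq l1 l2 (x - j) (y - j) = true) := by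
  unfold pvCondB
  have hkt : ((k.toNat : Nat) : Int) = k := by omega
  rw [Bool.and_eq_true, decide_eq_true_iff]
  rw [show (pvRun l1 l2 x y ≥ k) ↔ ((k.toNat : Int) ≤ pvRun l1 l2 x y) by rw [hkt]]
  rw [pvRun_ge_iff]
  constructor
  · intro ⟨hM, h1, h2⟩
    refine ⟨by omega, ?_⟩
    intro j hj
    exact h2 j (by omega)
  · intro ⟨h1, h2⟩
    refine ⟨?_, by omega, ?_⟩
    · simpa using h2 0 (by omega)
    · intro j hj
      exact h2 j (by omega)

-- pointwise: A = B off the bad cells, and (A, B) = (true, false) on them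
theorem pvCond_eq (l1 l2 : List Char) (k : Int) (x y : Nat) (h : ¬ pvBad l1 l2 k x y) :
    pvCondA l1 l2 k (x : Int) (y : Int) = pvCondB l1 l2 k x y := by
  by_cases hk : 2 ≤ k
  · unfold pvBad at h
    push Not at h
    apply Bool.eq_iff_iff.mpr
    rw [pvCondA_iff l1 l2 k x y hk, pvCondB_iff l1 l2 k x y hk]
    set T : Nat := (k - 1).toNat with hT
    have hTI : ((T : Nat) : Int) = k - 1 := by omega
    have hT1 : 1 ≤ T := by omega
    constructor
    · intro ⟨hM, hxk, hyk, hall⟩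
      have hdT : T ≤ min x y := by omega
      have hj : ∀ j : Nat, j < T → pvMEq l1 l2 (x - j) (y - j) = true := by
        intro j hjT
        cases Nat.eq_zero_or_pos j with
        | inl h0 => subst h0; simpa using hM
        | inr h1 => exact hall j h1 (by omega) (by omega) (by omega)
      have hlast : pvMEq l1 l2 (x - T) (y - T) = true := by
        rcases Nat.lt_or_ge T (min x y) with hlt | hge
        · exact hall T hT1 (by omega) (by omega) (by omega)
        · have hdeq : min x y = T := by omega
          by_contra hc
          exact absurd (h hk hdeq hj) (by simpa using hc)
      refine ⟨by omega, ?_⟩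
      intro j hjk
      have hjT : j ≤ T := by omega
      rcases Nat.lt_or_ge j T with hlt | hge
      · exact hj j hlt
      · have : j = T := by omega
        subst this
        exact hlast
    · intro ⟨hd, hall⟩
      have hdT : T ≤ min x y := by omega
      refine ⟨by simpa using hall 0 (by omega), by omega, by omega, ?_⟩
      intro j hj1 hjk _ _
      exact hall j (by omega)
  · -- k ≤ 1: A marks exactly the matching cells; B too, since a match has run ≥ 1 ≥ k
    have hch1 : pvChAt l1 (x : Int) = l1.getD x ' ' := by
      simpa using pvChAt_toNat l1 (x : Int) (by positivity)
    have hch2 : pvChAt l2 (y : Int) = l2.getD y ' ' := by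
      simpa using pvChAt_toNat l2 (y : Int) (by positivity)
    unfold pvCondA pvCondB
    rw [hch1, hch2]
    rw [if_pos (Or.inr (by omega : k ≤ 1))]
    show (pvMEq l1 l2 x y && (if true = true ∧ k > 1 then pvLookA l1 l2 (↑x) (↑y) (PySem.List.pyRange 1 k) else true)) = (pvMEq l1 l2 x y && decide (pvRun l1 l2 x y ≥ k))
    rw [if_neg (by simp only [true_and, gt_iff_lt, not_lt]; omega : ¬ (true = true ∧ k > 1))]
    by_cases hm : pvMEq l1 l2 x y = true
    · have hr : (1 : Int) ≤ pvRun l1 l2 x y := by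
        have h1 := (pvRun_ge_iff l1 l2 x y 1).mpr ⟨by omega, by
          intro j hj
          have : j = 0 := by omega
          subst this
          simpa using hm⟩
        exact_mod_cast h1
      rw [hm]
      simp [ge_iff_le]
      omega
    · have hmf : pvMEq l1 l2 x y = false := by simpa using hm
      rw [hmf]
      simp

theorem pvCond_bad (l1 l2 : List Char) (k : Int) (x y : Nat) (h : pvBad l1 l2 k x y) :
    pvCondA l1 l2 k (x : Int) (y : Int) = true ∧ pvCondB l1 l2 k x y = false := by
  obtain ⟨hk, hd, hall, hlast⟩ := h
  set T : Nat := (k - 1).toNat with hT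
  have hTI : ((T : Nat) : Int) = k - 1 := by omega
  have hT1 : 1 ≤ T := by omega
  constructor
  · rw [pvCondA_iff l1 l2 k x y hk]
    refine ⟨by simpa using hall 0 (by omega), by omega, by omega, ?_⟩
    intro j hj1 hjk hjx hjy
    exact hall j (by omega)
  · by_contra hc
    have hct : pvCondB l1 l2 k x y = true := by simpa using hc
    rw [pvCondB_iff l1 l2 k x y hk] at hct
    obtain ⟨_, hall2⟩ := hct
    exact absurd (hall2 T (by omega)) (by simpa using hlast)

theorem pvChAt_eq_iff (l1 l2 : List Char) (x y i : Nat) (hix : i ≤ x) (hiy : i ≤ y) :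
    (pvChAt l1 ((x : Int) - i) = pvChAt l2 ((y : Int) - i)) ↔ pvMEq l1 l2 (x - i) (y - i) = true := by
  rw [pvChAt_toNat _ _ (by omega), pvChAt_toNat _ _ (by omega)]
  have e1 : ((x : Int) - i).toNat = x - i := by omega
  have e2 : ((y : Int) - i).toNat = y - i := by omega
  rw [e1, e2]
  simp [pvMEq]

theorem pvBadAt_iff (l1 l2 : List Char) (k : Int) (x y : Nat) :
    pvBadAt l1 l2 k x y ↔ pvBad l1 l2 k x y := by
  unfold pvBadAt pvBad
  have hcast : min ((x : Nat) : Int) ((y : Nat) : Int) = ((min x y : Nat) : Int) := by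
    rw [Nat.cast_min]
  rw [hcast]
  constructor
  · rintro ⟨hk, hmin, hiff⟩
    have hT : min x y = (k - 1).toNat := by omega
    refine ⟨hk, hT, ?_, ?_⟩
    · intro i hi
      rw [← pvChAt_eq_iff l1 l2 x y i (by omega) (by omega)]
      exact (hiff i (by omega)).mpr (by omega)
    · have h1 := hiff (min x y) le_rfl
      rw [pvChAt_eq_iff l1 l2 x y (min x y) (by omega) (by omega)] at h1
      have h2 : ¬ (pvMEq l1 l2 (x - min x y) (y - min x y) = true) :=
        fun hc => absurd (h1.mp hc) (lt_irrefl _)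
      rw [← hT]
      simpa using h2
  · rintro ⟨hk, hT, hall, hlast⟩
    refine ⟨hk, by omega, ?_⟩
    intro i hi
    rw [pvChAt_eq_iff l1 l2 x y i (by omega) (by omega)]
    constructor
    · intro heq
      by_contra hge
      have hie : i = min x y := by omega
      subst hie
      rw [hT] at heq
      rw [heq] at hlast
      exact absurd hlast (by simp)
    · intro hlt
      exact hall i (by omega)

-- D_ in terms of pvBad
theorem D_iff (s1 s2 : String) (k : Int) :
    D_dotplot s1 s2 k ↔ ∃ x < s1.toList.length, ∃ y < s2.toList.length, pvBad s1.toList s2.toList k x y := by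
  unfold D_dotplot
  exact exists_congr fun x => and_congr_right fun _ =>
    exists_congr fun y => and_congr_right fun _ => pvBadAt_iff _ _ _ _ _

-- ===== VERDICT (by name: the statements are the Claim_ definitions above) =====
theorem dotplot_spec : Claim_unchanged_dotplot := by
  intro s1 s2 k _ hnd
  show dotplot s1 s2 k = dotplot_alt s1 s2 k
  rw [D_iff] at hnd
  push Not at hnd
  rw [dotplot_eq, dotplot_alt_eq]
  refine List.map_congr_left (fun y hy => ?_)
  have hy' : y < s2.toList.length := by simpa using List.mem_range.mp hy
  congr 1
  refine List.map_congr_left (fun x hx => ?_)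
  have hx' : x < s1.toList.length := by simpa using List.mem_range.mp hx
  rw [pvCond_eq _ _ _ _ _ (hnd x hx' y hy')]

theorem dotplot_changed : Claim_changed_dotplot := by
  unfold Claim_changed_dotplot
  refine ⟨by decide, ?_, by decide, by decide, by decide⟩
  unfold pvDiffWitness_dotplot D_dotplot pvBadAt
  decide

theorem dotplot_tight : Claim_exact_dotplot := by
  intro s1 s2 k _ hD hEq
  rw [D_iff] at hD
  obtain ⟨x, hx, y, hy, hbad⟩ := hD
  rw [dotplot_eq, dotplot_alt_eq] at hEq
  have hyr : y < ((List.range s2.toList.length).map (fun (y : Nat) =>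
      String.ofList ((List.range s1.toList.length).map (fun (x : Nat) =>
        if pvCondA s1.toList s2.toList k (x : Int) (y : Int) then '.' else ' ')))).length := by
    simpa using hy
  have hyr' : y < ((List.range s2.toList.length).map (fun (y : Nat) =>
      String.ofList ((List.range s1.toList.length).map (fun (x : Nat) =>
        if pvCondB s1.toList s2.toList k x y then '.' else ' ')))).length := by
    simpa using hy
  have h1 := List.getElem_of_eq hEq hyr
  simp only [List.getElem_map, List.getElem_range] at h1
  have hlist := congrArg String.toList h1
  simp only [String.toList_ofList] at hlist
  have hxr : x < ((List.range s1.toList.length).map (fun (x : Nat) =>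
      if pvCondA s1.toList s2.toList k (x : Int) (y : Int) then '.' else ' ')).length := by
    simpa using hx
  have hcell := List.getElem_of_eq hlist hxr
  simp only [List.getElem_map, List.getElem_range] at hcell
  obtain ⟨hA, hB⟩ := pvCond_bad s1.toList s2.toList k x y hbad
  rw [hA, hB] at hcell
  simp at hcell
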